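-- pv_equiv track=rewrite | github.com/noencrp87/airbnb-assistant-NR | airbnb-assistant/app.py | pick_section_snippets
-- ===== SOURCE A (Python) =====
-- def pick_section_snippets(chunks, preferred_section: str, k=2):
--     if not chunks:
--         return []
--     preferred = [c for c in chunks if c.get("section") == preferred_section] if preferred_section else []
--     others = [c for c in chunks if not preferred_section or c.get("section") != preferred_section]
--     out = []
--     for c in preferred:
--         if len(out) < k:
--             out.append(c)
--     for c in others:
--         if len(out) < k:
--             out.append(c)
--     return out
-- ===== SOURCE B (Python) =====
-- def pick_section_snippets(chunks, preferred_section: str, k=2):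
--     key = lambda c: 0 if preferred_section and c.get("section") == preferred_section else 1
--     return sorted(chunks, key=key)[:max(k, 0)]
-- ===== Notes on version B (the rewrite author's own statement) =====
-- stated objective: idiomatic
-- what changed: Replaced the partition-into-two-lists plus two capped append loops by a single stable sort on a 0/1 priority key followed by a slice [:max(k,0)].
import Mathlib
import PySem

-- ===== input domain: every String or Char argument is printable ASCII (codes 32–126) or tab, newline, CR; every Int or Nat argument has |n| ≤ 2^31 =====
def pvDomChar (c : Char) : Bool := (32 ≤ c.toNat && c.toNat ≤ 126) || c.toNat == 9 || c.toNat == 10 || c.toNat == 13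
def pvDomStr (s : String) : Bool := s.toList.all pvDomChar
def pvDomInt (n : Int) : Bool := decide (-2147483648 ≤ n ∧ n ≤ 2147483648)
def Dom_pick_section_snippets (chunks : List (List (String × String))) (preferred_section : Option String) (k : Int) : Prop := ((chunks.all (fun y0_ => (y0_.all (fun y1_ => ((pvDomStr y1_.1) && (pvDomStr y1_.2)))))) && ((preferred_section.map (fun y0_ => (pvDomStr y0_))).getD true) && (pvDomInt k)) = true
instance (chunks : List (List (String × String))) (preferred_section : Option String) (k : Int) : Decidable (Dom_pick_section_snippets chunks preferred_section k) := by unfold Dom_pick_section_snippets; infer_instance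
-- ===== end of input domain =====

-- B replaces A's partition + two capped append loops by one stable sort on a 0/1
-- priority key followed by a slice [:max(k,0)] (idiomatic; same return value).

-- Python truthiness of an Optional[str]: None and "" are falsy.
def pyTruthyOptStr (ps : Option String) : Bool :=
  match ps with
  | none => false
  | some s => !(s == "")

-- ===== PORT A =====
def pick_section_snippets (chunks : List (List (String × String))) (preferred_section : Option String) (k : Int) : List (List (String × String)) :=
  if chunks.isEmpty then []
  else
    let preferred :=
      if pyTruthyOptStr preferred_section then
        chunks.filter (fun c => c.lookup "section" == preferred_section)
      else []
    let others :=
      chunks.filter (fun c =>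
        !pyTruthyOptStr preferred_section || !(c.lookup "section" == preferred_section))
    let out := preferred.foldl (fun out c => if (out.length : Int) < k then out ++ [c] else out) []
    let out := others.foldl (fun out c => if (out.length : Int) < k then out ++ [c] else out) out
    out

-- ===== PORT B =====
def pick_section_snippets_alt (chunks : List (List (String × String))) (preferred_section : Option String) (k : Int) : List (List (String × String)) :=
  PySem.List.slice
    (PySem.List.sorted chunks
      (fun c => if pyTruthyOptStr preferred_section && (c.lookup "section" == preferred_section) then (0:Int) else 1))
    none (some (max k 0))

-- ===== PRECONDITION & SPEC =====
def Spec_pick_section_snippets (chunks : List (List (String × String))) (preferred_section : Option String) (k : Int) (out : List (List (String × String))) : Prop := out = pick_section_snippets_alt chunks preferred_section k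
instance (chunks : List (List (String × String))) (preferred_section : Option String) (k : Int) (out : List (List (String × String))) : Decidable (Spec_pick_section_snippets chunks preferred_section k out) := by unfold Spec_pick_section_snippets; infer_instance

-- ===== CLAIM (what is proved, stated in full; the proofs are below) =====
def Claim_equal_pick_section_snippets : Prop := ∀ (chunks : List (List (String × String))) (preferred_section : Option String) (k : Int), Dom_pick_section_snippets chunks preferred_section k → Spec_pick_section_snippets chunks preferred_section k (pick_section_snippets chunks preferred_section k)

-- ===== LEMMAS AND PROOFS =====

-- insertBy walks past a prefix it is not inserted into.
theorem insertBy_skip {α : Type} (before : α → α → Bool) (x : α)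
    (A ys : List α) (hA : ∀ a ∈ A, before x a = false) :
    PySem.List.insertBy before x (A ++ ys) = A ++ PySem.List.insertBy before x ys := by
  induction A with
  | nil => rfl
  | cons a A ih =>
    have ha : before x a = false := hA a (by simp)
    simp only [List.cons_append, PySem.List.insertBy, ha, Bool.false_eq_true, if_false]
    simp [ih (fun b hb => hA b (by simp [hb]))]

-- Insertion sort with a 0/1 key keeps the two classes in order: invariant of the foldl.
theorem foldl_insertBy_binary {α : Type} (P : α → Bool) :
    ∀ (xs A B : List α), (∀ a ∈ A, P a = true) → (∀ b ∈ B, P b = false) →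
      xs.foldl (fun acc x =>
          PySem.List.insertBy
            (fun a b => decide ((if P a then (0:Int) else 1) < (if P b then (0:Int) else 1))) x acc)
        (A ++ B)
      = (A ++ xs.filter P) ++ (B ++ xs.filter (fun x => !P x)) := by
  intro xs
  induction xs with
  | nil => intro A B _ _; simp
  | cons x xs ih =>
    intro A B hA hB
    simp only [List.foldl_cons]
    by_cases hx : P x = true
    · have hskip : ∀ a ∈ A, (fun a b => decide ((if P a then (0:Int) else 1) < (if P b then (0:Int) else 1))) x a = false := by
        intro a ha; simp [hx, hA a ha]
      rw [insertBy_skip _ _ _ _ hskip]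
      have hins : PySem.List.insertBy
          (fun a b => decide ((if P a then (0:Int) else 1) < (if P b then (0:Int) else 1))) x B
          = x :: B := by
        cases B with
        | nil => rfl
        | cons b B' =>
          have hb : P b = false := hB b (by simp)
          simp [PySem.List.insertBy, hx, hb]
      rw [hins]
      have hAx : A ++ x :: B = (A ++ [x]) ++ B := by simp
      rw [hAx, ih (A ++ [x]) B
        (by intro a ha
            rcases List.mem_append.1 ha with h | h
            · exact hA a h
            · rw [List.mem_singleton.1 h]; exact hx) hB]
      simp [hx]
    · have hall : PySem.List.insertBy
          (fun a b => decide ((if P a then (0:Int) else 1) < (if P b then (0:Int) else 1))) x (A ++ B)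
          = (A ++ B) ++ [x] := by
        apply PySem.List.insertBy_of_forall_not_before
        intro y _; by_cases hy : P y = true <;> simp [hx, hy]
      rw [hall, List.append_assoc, ih A (B ++ [x]) hA
        (by intro b hb
            rcases List.mem_append.1 hb with h | h
            · exact hB b h
            · rw [List.mem_singleton.1 h]; exact Bool.eq_false_iff.2 hx)]
      simp [hx]

-- sorted with a 0/1 key is the stable partition.
theorem sorted_binary {α : Type} (P : α → Bool) (xs : List α) :
    PySem.List.sorted xs (fun x => if P x then (0:Int) else 1)
      = xs.filter P ++ xs.filter (fun x => !P x) := by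
  have h := foldl_insertBy_binary P xs [] [] (by simp) (by simp)
  simpa [PySem.List.sorted] using h

-- A's capped append loop is a take.
theorem foldl_cap {α : Type} (k : Int) :
    ∀ (xs acc : List α),
      xs.foldl (fun out c => if (out.length : Int) < k then out ++ [c] else out) acc
        = acc ++ xs.take (k - acc.length).toNat := by
  intro xs
  induction xs with
  | nil => intro acc; simp
  | cons c xs ih =>
    intro acc
    simp only [List.foldl_cons]
    by_cases h : (acc.length : Int) < k
    · rw [if_pos h, ih (acc ++ [c])]
      have hn : (k - (acc.length : Int)).toNat = (k - ((acc ++ [c]).length : Int)).toNat + 1 := by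
        simp only [List.length_append, List.length_cons, List.length_nil]
        omega
      rw [hn, List.take_succ_cons]
      simp
    · rw [if_neg h, ih acc]
      have hn : (k - (acc.length : Int)).toNat = 0 := by omega
      simp [hn]

-- ===== VERDICT (by name: the statement is the Claim_ definition above) =====
theorem pick_section_snippets_spec : Claim_equal_pick_section_snippets := by
  intro chunks ps k _
  show pick_section_snippets chunks ps k = pick_section_snippets_alt chunks ps k
  unfold pick_section_snippets pick_section_snippets_alt
  rw [(by omega : max k 0 = ((k.toNat : Nat) : Int))]
  by_cases ht : pyTruthyOptStr ps = true
  · simp only [ht, Bool.true_and, Bool.not_true, Bool.false_or, if_true]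
    rw [sorted_binary (fun c => c.lookup "section" == ps) chunks, PySem.List.slice_to_natCast]
    by_cases hnil : chunks.isEmpty
    · rcases List.isEmpty_iff.1 hnil with rfl; simp
    · rw [if_neg hnil, foldl_cap, foldl_cap, List.take_append]
      simp only [List.nil_append, List.length_take, List.length_nil, Nat.cast_zero, Int.sub_zero]
      congr 2
      all_goals omega
  · have ht' : pyTruthyOptStr ps = false := Bool.eq_false_iff.2 ht
    simp only [ht', Bool.false_and, Bool.not_false, Bool.true_or, Bool.false_eq_true, if_false]
    have hconst : PySem.List.sorted chunks (fun _ => (1:Int)) = chunks :=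
      PySem.List.sorted_eq_self_of_pairwise chunks (fun _ => (1:Int))
        (List.pairwise_iff_forall_sublist.2 (by intro a b _; exact le_refl 1))
    rw [hconst, PySem.List.slice_to_natCast]
    by_cases hnil : chunks.isEmpty
    · rcases List.isEmpty_iff.1 hnil with rfl; simp
    · rw [if_neg hnil, List.filter_true, foldl_cap, foldl_cap]
      simp
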